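-- pv_equiv track=rewrite | github.com/Rushwik17/INLP_a1 | tokenizer.py | whitespace
-- ===== SOURCE A (Python) =====
-- def whitespace(text):
--     tokens = []
--     current = ""
--
--     for ch in text:
--         if ch.isspace():
--             if current:
--                 tokens.append(current)
--                 current = ""
--
--         elif not ch.isalnum():
--             if current:
--                 tokens.append(current)
--                 current = ""
--             tokens.append(ch)
--
--         else:
--             current += ch
--
--     if(current):
--         tokens.append(current)
--
--     return tokens
-- ===== SOURCE B (Python) =====
-- def whitespace(text):
--     def cls(ch):
--         if ch.isspace():
--             return 0
--         if not ch.isalnum():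
--             return 1
--         return 2
--     tokens = []
--     i = 0
--     n = len(text)
--     while i < n:
--         k = cls(text[i])
--         j = i + 1
--         while j < n and cls(text[j]) == k:
--             j += 1
--         if k == 2:
--             tokens.append(text[i:j])
--         elif k == 1:
--             tokens.extend(text[i:j])
--         i = j
--     return tokens
-- ===== Notes on version B (the rewrite author's own statement) =====
-- stated objective: alternative
-- what changed: A threads a growing token buffer through a per-character state machine; B classifies characters (space/punct/alnum) and scans maximal same-class runs by index, emitting each whole run at once (alnum run joined, punct run char-by-char, space run skipped).
import Mathlib
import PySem

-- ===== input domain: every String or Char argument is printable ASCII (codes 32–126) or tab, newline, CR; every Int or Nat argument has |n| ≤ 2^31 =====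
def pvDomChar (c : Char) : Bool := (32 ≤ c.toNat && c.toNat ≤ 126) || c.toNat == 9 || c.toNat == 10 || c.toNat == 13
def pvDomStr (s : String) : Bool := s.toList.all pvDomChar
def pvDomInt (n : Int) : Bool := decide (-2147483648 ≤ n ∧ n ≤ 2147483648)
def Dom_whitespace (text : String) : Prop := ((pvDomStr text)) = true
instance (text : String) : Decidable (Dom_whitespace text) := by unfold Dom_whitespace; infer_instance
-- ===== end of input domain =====

-- B replaces A's per-character buffer-threading state machine by a run scanner: classify each char
-- (space/punct/alnum) and emit each maximal same-class run at once (objective: alternative decomposition).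

-- ===== PORT A =====
-- literal port of A's loop: state = (tokens, current); branches in A's order
def whitespaceGo (cs : List Char) (tokens : List String) (cur : List Char) : List String :=
  match cs with
  | [] => if cur.isEmpty then tokens else tokens ++ [String.ofList cur]
  | c :: rest =>
    if PySem.Chars.isspace c then
      if cur.isEmpty then whitespaceGo rest tokens []
      else whitespaceGo rest (tokens ++ [String.ofList cur]) []
    else if !(PySem.Chars.isalnum c) then
      if cur.isEmpty then whitespaceGo rest (tokens ++ [String.ofList [c]]) []
      else whitespaceGo rest (tokens ++ [String.ofList cur, String.ofList [c]]) []
    else whitespaceGo rest tokens (cur ++ [c])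

def whitespace (text : String) : List String := whitespaceGo text.toList [] []

-- ===== PORT B =====
-- classifier: 0 = space, 1 = punct, 2 = alnum (same predicate priority as A)
def pvCls (c : Char) : Nat :=
  if PySem.Chars.isspace c then 0 else if !(PySem.Chars.isalnum c) then 1 else 2

-- emit one maximal run text[i:j] of class k (skip spaces, punct char-by-char, alnum as one token)
def pvEmit (k : Nat) (run : List Char) : List String :=
  if k == 0 then [] else if k == 1 then run.map (fun c => String.ofList [c]) else [String.ofList run]

-- Source B's scan: k = class of the run's first char, buf = the slice text[i:j] collected so far;
-- the inner while extends buf while the class matches, on a class change the run is emitted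
def pvAltRun (k : Nat) (buf : List Char) (cs : List Char) : List String :=
  match cs with
  | [] => pvEmit k buf
  | c :: rest =>
    if pvCls c == k then pvAltRun k (buf ++ [c]) rest
    else pvEmit k buf ++ pvAltRun (pvCls c) [c] rest

-- outer loop entry: first char of the input starts the first run
def pvAltStart (cs : List Char) : List String :=
  match cs with
  | [] => []
  | c :: rest => pvAltRun (pvCls c) [c] rest

def whitespace_alt (text : String) : List String := pvAltStart text.toList

-- ===== PRECONDITION & SPEC =====
def Spec_whitespace (text : String) (out : List String) : Prop := out = whitespace_alt text
instance (text : String) (out : List String) : Decidable (Spec_whitespace text out) := by unfold Spec_whitespace; infer_instance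

-- ===== CLAIM (what is proved, stated in full; the proofs are below) =====
def Claim_equal_whitespace : Prop := ∀ (text : String), Dom_whitespace text → Spec_whitespace text (whitespace text)

-- ===== LEMMAS AND PROOFS =====

-- what A will still produce given the pending buffer `cur` and remaining input `cs`
def pvPend (cur : List Char) (cs : List Char) : List String :=
  match cs with
  | [] => if cur.isEmpty then [] else [String.ofList cur]
  | c :: rest =>
    if pvCls c == 2 then pvAltRun 2 (cur ++ [c]) rest
    else (if cur.isEmpty then [] else [String.ofList cur]) ++ pvAltStart (c :: rest)

theorem pvPend_nil_eq (cs : List Char) : pvPend [] cs = pvAltStart cs := by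
  cases cs with
  | nil => rfl
  | cons c rest =>
    simp only [pvPend, pvAltStart, List.isEmpty_nil, if_pos, List.nil_append]
    by_cases h : pvCls c = 2
    · simp [h]
    · simp [h]

theorem spaceRun (cs : List Char) : ∀ buf, pvAltRun 0 buf cs = pvAltStart cs := by
  induction cs with
  | nil => intro buf; simp [pvAltRun, pvAltStart, pvEmit]
  | cons c rest ih =>
    intro buf
    by_cases h : pvCls c = 0
    · simp [pvAltRun, pvAltStart, h, ih]
    · simp [pvAltRun, pvAltStart, h, pvEmit]

theorem punctRun (cs : List Char) :
    ∀ buf, pvAltRun 1 buf cs = buf.map (fun c => String.ofList [c]) ++ pvAltStart cs := by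
  induction cs with
  | nil => intro buf; simp [pvAltRun, pvAltStart, pvEmit]
  | cons c rest ih =>
    intro buf
    by_cases h : pvCls c = 1
    · simp [pvAltRun, pvAltStart, h, ih]
    · simp [pvAltRun, pvAltStart, h, pvEmit]

theorem alnumRun (cs : List Char) (buf : List Char) (hb : buf.isEmpty = false) :
    pvAltRun 2 buf cs = pvPend buf cs := by
  cases cs with
  | nil => simp [pvAltRun, pvPend, pvEmit, hb]
  | cons c rest =>
    by_cases h : pvCls c = 2
    · simp [pvAltRun, pvPend, h]
    · simp [pvAltRun, pvPend, pvAltStart, pvEmit, h, hb]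

-- class facts from the branch tests of A
theorem cls_space {c : Char} (h : PySem.Chars.isspace c = true) : pvCls c = 0 := by
  simp [pvCls, h]
theorem cls_punct {c : Char} (h1 : PySem.Chars.isspace c = false)
    (h2 : PySem.Chars.isalnum c = false) : pvCls c = 1 := by simp [pvCls, h1, h2]
theorem cls_alnum {c : Char} (h1 : PySem.Chars.isspace c = false)
    (h2 : PySem.Chars.isalnum c = true) : pvCls c = 2 := by simp [pvCls, h1, h2]

theorem whitespaceGo_eq (cs : List Char) :
    ∀ tokens cur, whitespaceGo cs tokens cur = tokens ++ pvPend cur cs := by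
  induction cs with
  | nil => intro tokens cur; simp only [whitespaceGo, pvPend]; split_ifs <;> simp
  | cons c rest ih =>
    intro tokens cur
    rw [whitespaceGo]
    by_cases hs : PySem.Chars.isspace c
    · have h0 := cls_space hs
      rw [if_pos hs]
      have hrhs : pvPend cur (c :: rest) =
          (if cur.isEmpty then [] else [String.ofList cur]) ++ pvAltStart rest := by
        simp [pvPend, h0, pvAltStart, spaceRun]
      by_cases hc : cur.isEmpty
      · rw [if_pos hc, ih, pvPend_nil_eq, hrhs, hc]; simp
      · rw [if_neg hc, ih, pvPend_nil_eq, hrhs, if_neg hc]; simp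
    · have hs' : PySem.Chars.isspace c = false := by simpa using hs
      rw [if_neg hs]
      by_cases ha : PySem.Chars.isalnum c
      · have h2 := cls_alnum hs' ha
        rw [if_neg (by simp [ha]), ih]
        have : pvPend cur (c :: rest) = pvPend (cur ++ [c]) rest := by
          rw [pvPend, if_pos (by simp [h2]), alnumRun rest (cur ++ [c]) (by simp)]
        rw [this]
      · have ha' : PySem.Chars.isalnum c = false := by simpa using ha
        have h1 := cls_punct hs' ha'
        rw [if_pos (by simp [ha'])]
        have hrhs : pvPend cur (c :: rest) =
            (if cur.isEmpty then [] else [String.ofList cur]) ++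
              [String.ofList [c]] ++ pvAltStart rest := by
          simp [pvPend, h1, pvAltStart, punctRun]
        by_cases hc : cur.isEmpty
        · rw [if_pos hc, ih, pvPend_nil_eq, hrhs, if_pos hc]; simp
        · rw [if_neg hc, ih, pvPend_nil_eq, hrhs, if_neg hc]; simp
  -- note: the space/punct branches reassociate the appended tokens; `simp` closes them

-- ===== VERDICT (by name: the statement is the Claim_ definition above) =====
theorem whitespace_spec : Claim_equal_whitespace := by
  intro text _
  unfold Spec_whitespace whitespace whitespace_alt
  rw [whitespaceGo_eq, pvPend_nil_eq]
  simp
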